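-- pv_equiv track=rewrite | github.com/jku-isse/ecco-adapter-python | src/main/resources/python_cst_reader.py | normalizeEmptyLines
-- ===== SOURCE A (Python) =====
-- def normalizeEmptyLines(content: str) -> str:
--     lines = []
--     ok = " \t\n"
--     for line in content.split('\n'):
--         if all(c in ok for c in line):
--             lines.append('')
--         else:
--             lines.append(line)
--     return '\n'.join(lines)
-- ===== SOURCE B (Python) =====
-- def normalizeEmptyLines(content: str) -> str:
--     # Single pass over the characters: buffer the current line, track whether it
--     # is blank (spaces/tabs only), and emit '' for blank lines at each '\n'.
--     out = []
--     cur = []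
--     blank = True
--     for c in content:
--         if c == '\n':
--             out.append('' if blank else ''.join(cur))
--             out.append('\n')
--             cur = []
--             blank = True
--         else:
--             cur.append(c)
--             blank = blank and (c == ' ' or c == '\t')
--     out.append('' if blank else ''.join(cur))
--     return ''.join(out)
-- ===== Notes on version B (the rewrite author's own statement) =====
-- stated objective: alternative
-- what changed: Replaces split('\n')/per-line all()-scan/join rebuild with a single character-level state machine that buffers the current line and a blank flag and emits lines as it meets each newline.
import Mathlib
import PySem

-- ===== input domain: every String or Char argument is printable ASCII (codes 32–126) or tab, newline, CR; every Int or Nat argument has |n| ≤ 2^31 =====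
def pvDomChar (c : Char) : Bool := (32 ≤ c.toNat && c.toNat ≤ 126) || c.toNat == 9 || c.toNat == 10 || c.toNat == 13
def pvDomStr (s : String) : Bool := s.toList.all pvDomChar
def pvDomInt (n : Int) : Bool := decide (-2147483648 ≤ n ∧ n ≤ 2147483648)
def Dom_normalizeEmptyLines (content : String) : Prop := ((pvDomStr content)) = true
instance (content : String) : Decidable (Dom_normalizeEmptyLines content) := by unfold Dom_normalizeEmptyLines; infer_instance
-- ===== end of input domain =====

-- B replaces A's split/per-line-scan/join with a one-pass character state machine (an alternative of the same cost).

-- ===== PORT A =====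
-- 'c in ok' on a one-character c and ok = " \t\n" is exactly membership of c among ok's characters.
def normalizeEmptyLines (content : String) : String :=
  let ok : List Char := [' ', '\t', '\n']
  let lines := (PySem.Chars.splitOn content.toList ['\n']).foldl
      (fun lines line => lines ++ [if line.all (fun c => ok.contains c) then ([] : List Char) else line]) []
  String.mk (PySem.Chars.join ['\n'] lines)

-- ===== PORT B =====
-- state = (out, cur, blank), exactly Source B's loop variables
def altStep (st : List Char × List Char × Bool) (c : Char) : List Char × List Char × Bool :=
  if c = '\n' then (st.1 ++ (if st.2.2 then [] else st.2.1) ++ ['\n'], [], true)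
  else (st.1, st.2.1 ++ [c], st.2.2 && (c == ' ' || c == '\t'))

def normalizeEmptyLines_alt (content : String) : String :=
  let st := content.toList.foldl altStep ([], [], true)
  String.mk (st.1 ++ (if st.2.2 then [] else st.2.1))

-- ===== PRECONDITION & SPEC =====
def Spec_normalizeEmptyLines (content : String) (out : String) : Prop := out = normalizeEmptyLines_alt content
instance (content : String) (out : String) : Decidable (Spec_normalizeEmptyLines content out) := by unfold Spec_normalizeEmptyLines; infer_instance

-- ===== CLAIM (what is proved, stated in full; the proofs are below) =====
def Claim_equal_normalizeEmptyLines : Prop := ∀ (content : String), Dom_normalizeEmptyLines content → Spec_normalizeEmptyLines content (normalizeEmptyLines content)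

-- ===== LEMMAS AND PROOFS =====

-- simple recursive model of content.split('\n')
def pvLines : List Char → List (List Char)
  | [] => [[]]
  | c :: rest =>
    if c = '\n' then [] :: pvLines rest
    else match pvLines rest with
      | [] => [[c]]
      | h :: t => (c :: h) :: t

def pvConsHead (p : List Char) : List (List Char) → List (List Char)
  | [] => [p]
  | h :: t => (p ++ h) :: t

def pvF (l : List Char) : List Char :=
  if l.all (fun c => ([' ', '\t', '\n'] : List Char).contains c) then [] else l

theorem pvF_if (cur : List Char) (blank : Bool)
    (hb : blank = cur.all (fun c => ([' ', '\t', '\n'] : List Char).contains c)) :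
    (if blank then ([] : List Char) else cur) = pvF cur := by
  rw [hb]; rfl

theorem pvLines_ne_nil (cs : List Char) : pvLines cs ≠ [] := by
  cases cs with
  | nil => simp [pvLines]
  | cons c rest =>
    simp only [pvLines]
    split
    · simp
    · cases h : pvLines rest <;> simp

theorem pvLines_exists_cons (cs : List Char) : ∃ a t, pvLines cs = a :: t := by
  cases h : pvLines cs with
  | nil => exact absurd h (pvLines_ne_nil cs)
  | cons a t => exact ⟨a, t, rfl⟩

theorem pvConsHead_nil (xs : List (List Char)) (h : xs ≠ []) : pvConsHead [] xs = xs := by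
  cases xs with
  | nil => exact absurd rfl h
  | cons a t => simp [pvConsHead]

theorem pvConsHead_shift (p : List Char) (c : Char) (xs : List (List Char)) (h : xs ≠ []) :
    pvConsHead p (pvConsHead [c] xs) = pvConsHead (p ++ [c]) xs := by
  cases xs with
  | nil => exact absurd rfl h
  | cons a t => simp [pvConsHead]

theorem pvLines_cons_ne (c : Char) (rest : List Char) (hc : c ≠ '\n') :
    pvLines (c :: rest) = pvConsHead [c] (pvLines rest) := by
  obtain ⟨a, t, h⟩ := pvLines_exists_cons rest
  simp [pvLines, hc, h, pvConsHead]

theorem splitOn_go_eq : ∀ (l : List Char) (fuel : Nat) (cur : List Char) (acc : List (List Char)),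
    l.length ≤ fuel →
    PySem.Chars.splitOn.go ['\n'] fuel l cur acc = acc.reverse ++ pvConsHead cur.reverse (pvLines l) := by
  intro l
  induction l with
  | nil =>
    intro fuel cur acc _
    cases fuel <;> simp [PySem.Chars.splitOn.go, pvLines, pvConsHead]
  | cons c rest ih =>
    intro fuel cur acc hf
    cases fuel with
    | zero => simp at hf
    | succ f =>
      by_cases hc : c = '\n'
      · subst hc
        rw [show PySem.Chars.splitOn.go ['\n'] (f+1) ('\n' :: rest) cur acc
              = PySem.Chars.splitOn.go ['\n'] f rest [] (cur.reverse :: acc) by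
            simp [PySem.Chars.splitOn.go, List.isPrefixOf]]
        rw [ih f [] (cur.reverse :: acc) (by simpa using Nat.le_of_succ_le_succ hf)]
        simp only [List.reverse_nil]
        rw [pvConsHead_nil _ (pvLines_ne_nil rest)]
        simp [pvLines, pvConsHead]
      · rw [show PySem.Chars.splitOn.go ['\n'] (f+1) (c :: rest) cur acc
              = PySem.Chars.splitOn.go ['\n'] f rest (c :: cur) acc by
            simp [PySem.Chars.splitOn.go, List.isPrefixOf, Ne.symm hc]]
        rw [ih f (c :: cur) acc (by simpa using Nat.le_of_succ_le_succ hf)]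
        rw [pvLines_cons_ne c rest hc, pvConsHead_shift _ _ _ (pvLines_ne_nil rest)]
        simp

theorem splitOn_eq (cs : List Char) : PySem.Chars.splitOn cs ['\n'] = pvLines cs := by
  unfold PySem.Chars.splitOn
  rw [splitOn_go_eq cs (cs.length + 1) [] [] (Nat.le_succ _)]
  simp [pvConsHead_nil _ (pvLines_ne_nil cs)]

theorem foldl_push (xs : List (List Char)) : ∀ (acc : List (List Char)),
    xs.foldl (fun lines line =>
        lines ++ [if line.all (fun c => ([' ', '\t', '\n'] : List Char).contains c) then ([] : List Char) else line]) acc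
      = acc ++ xs.map pvF := by
  induction xs with
  | nil => simp
  | cons x t ih =>
    intro acc
    rw [List.foldl_cons, ih, List.map_cons]
    simp only [pvF, List.append_assoc, List.singleton_append]

theorem intercalate_cons_cons (sep a b : List Char) (t : List (List Char)) :
    List.intercalate sep (a :: b :: t) = a ++ sep ++ List.intercalate sep (b :: t) := by
  simp [List.intercalate, List.intersperse]

theorem alt_go : ∀ (cs : List Char) (out cur : List Char) (blank : Bool),
    blank = cur.all (fun c => ([' ', '\t', '\n'] : List Char).contains c) →
    (let st := cs.foldl altStep (out, cur, blank);
     st.1 ++ (if st.2.2 then [] else st.2.1))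
      = out ++ PySem.Chars.join ['\n'] ((pvConsHead cur (pvLines cs)).map pvF) := by
  intro cs
  induction cs with
  | nil =>
    intro out cur blank hb
    simp only [List.foldl_nil, pvLines, pvConsHead, List.map_cons, List.map_nil, List.append_nil]
    rw [pvF_if cur blank hb]
    simp [PySem.Chars.join, List.intercalate, List.intersperse]
  | cons c rest ih =>
    intro out cur blank hb
    have hfcur : (if blank then ([] : List Char) else cur) = pvF cur :=
      pvF_if cur blank hb
    by_cases hc : c = '\n'
    · subst hc
      simp only [List.foldl_cons]
      have hstep : altStep (out, cur, blank) '\n'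
          = (out ++ (if blank then [] else cur) ++ ['\n'], [], true) := by
        simp [altStep]
      rw [hstep, ih _ [] true (by simp)]
      rw [pvConsHead_nil _ (pvLines_ne_nil rest)]
      have hpl : pvLines ('\n' :: rest) = [] :: pvLines rest := by simp [pvLines]
      rw [hpl]
      obtain ⟨a, t, hL⟩ := pvLines_exists_cons rest
      rw [hL]
      simp only [pvConsHead, List.append_nil, List.map_cons]
      rw [PySem.Chars.join, PySem.Chars.join, List.intercalate, List.intercalate,
        ← List.intercalate, ← List.intercalate, intercalate_cons_cons]
      simp [hfcur]
    · simp only [List.foldl_cons]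
      have hstep : altStep (out, cur, blank) c
          = (out, cur ++ [c], blank && (c == ' ' || c == '\t')) := by
        simp [altStep, hc]
      have hinv : (blank && (c == ' ' || c == '\t'))
          = (cur ++ [c]).all (fun c => ([' ', '\t', '\n'] : List Char).contains c) := by
        rw [hb, List.all_append]
        congr 1
        simp [hc]
        rfl
      rw [hstep, ih _ (cur ++ [c]) _ hinv]
      rw [pvLines_cons_ne c rest hc, pvConsHead_shift _ _ _ (pvLines_ne_nil rest)]

-- ===== VERDICT (by name: the statement is the Claim_ definition above) =====
theorem normalizeEmptyLines_spec : Claim_equal_normalizeEmptyLines := by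
  intro content _
  show normalizeEmptyLines content = normalizeEmptyLines_alt content
  unfold normalizeEmptyLines normalizeEmptyLines_alt
  have hB := alt_go content.toList [] [] true (by simp)
  simp only [] at hB ⊢
  rw [hB, splitOn_eq, foldl_push, pvConsHead_nil _ (pvLines_ne_nil content.toList)]
  simp
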